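-- pv_equiv track=rewrite | github.com/gilhyeon7071-code/contributed-by-me | krx_update_clean_incremental.py | _fallback_caps
-- ===== SOURCE A (Python) =====
-- from typing import Dict, List, Optional, Tuple
--
-- def _fallback_caps(total: int, seed: int) -> List[int]:
--     if total <= 0:
--         return []
--     seed = max(1, int(seed))
--     ramp = [seed, 300, 700, 1200, 1800, total]
--     caps: List[int] = []
--     for x in ramp:
--         c = min(total, int(x))
--         if c not in caps:
--             caps.append(c)
--     caps.sort()
--     return caps
-- ===== SOURCE B (Python) =====
-- from typing import List
--
-- def _fallback_caps(total: int, seed: int) -> List[int]: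
--     if total <= 0:
--         return []
--     s = min(total, max(1, int(seed)))
--     # fixed ramp constants are already sorted: keep those below total, cap with total
--     out = [k for k in (300, 700, 1200, 1800) if k < total]
--     out.append(total)
--     # insert the clamped seed at its sorted position unless already present
--     i = 0
--     while i < len(out) and out[i] < s:
--         i += 1
--     if i == len(out) or out[i] != s:
--         out.insert(i, s)
--     return out
-- ===== Notes on version B (the rewrite author's own statement) =====
-- stated objective: alternative
-- what changed: A clamps each ramp value, dedups by membership test while appending, then sorts; B never sorts: it filters the already-sorted fixed constants below total, appends total, and inserts the clamped seed at its sorted position with a single linear scan.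
import Mathlib
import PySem

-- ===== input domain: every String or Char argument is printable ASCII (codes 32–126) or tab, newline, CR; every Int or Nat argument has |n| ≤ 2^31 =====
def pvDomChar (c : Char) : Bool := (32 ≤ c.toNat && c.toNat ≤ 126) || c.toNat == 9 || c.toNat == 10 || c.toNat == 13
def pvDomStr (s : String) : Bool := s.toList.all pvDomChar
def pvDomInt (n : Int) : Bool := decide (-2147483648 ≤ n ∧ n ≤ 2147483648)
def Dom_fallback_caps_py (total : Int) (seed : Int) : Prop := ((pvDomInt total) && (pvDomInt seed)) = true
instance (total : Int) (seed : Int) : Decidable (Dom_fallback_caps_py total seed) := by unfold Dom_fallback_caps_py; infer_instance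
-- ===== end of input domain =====

-- B avoids A's dedup-while-appending + sort: it filters the already-sorted fixed constants below total, appends total, and inserts the clamped seed at its sorted position in one linear scan (alternative decomposition, same result).

-- ===== PORT A =====
def fallback_caps_py (total : Int) (seed : Int) : List Int :=
  if total ≤ 0 then []
  else
    let seed := max 1 seed
    let ramp : List Int := [seed, 300, 700, 1200, 1800, total]
    let caps := ramp.foldl (fun caps x =>
      let c := min total x
      if c ∈ caps then caps else caps ++ [c]) []
    PySem.List.sorted caps (fun x => x) false

-- ===== PORT B =====
-- transliterates Source B's linear-scan insertion (the while loop + conditional insert)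
def insSorted (v : Int) : List Int → List Int
  | [] => [v]
  | h :: t => if h < v then h :: insSorted v t else if h = v then h :: t else v :: h :: t

def fallback_caps_py_alt (total : Int) (seed : Int) : List Int :=
  if total ≤ 0 then []
  else
    let s := min total (max 1 seed)
    let base := (([300, 700, 1200, 1800] : List Int).filter (fun k => k < total)) ++ [total]
    insSorted s base

-- ===== PRECONDITION & SPEC =====
def Spec_fallback_caps_py (total : Int) (seed : Int) (out : List Int) : Prop := out = fallback_caps_py_alt total seed
instance (total : Int) (seed : Int) (out : List Int) : Decidable (Spec_fallback_caps_py total seed out) := by unfold Spec_fallback_caps_py; infer_instance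

-- ===== CLAIM (what is proved, stated in full; the proofs are below) =====
def Claim_equal_fallback_caps_py : Prop := ∀ (total : Int) (seed : Int), Dom_fallback_caps_py total seed → Spec_fallback_caps_py total seed (fallback_caps_py total seed)

-- ===== LEMMAS AND PROOFS =====

-- A's dedup-while-appending fold: result is duplicate-free and holds exactly acc's and the clamped ramp's elements.
theorem aFold_props (total : Int) (l : List Int) (acc : List Int) (hacc : acc.Nodup) :
    (l.foldl (fun caps x =>
      let c := min total x
      if c ∈ caps then caps else caps ++ [c]) acc).Nodup ∧
    (∀ z, z ∈ (l.foldl (fun caps x =>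
      let c := min total x
      if c ∈ caps then caps else caps ++ [c]) acc) ↔ z ∈ acc ∨ z ∈ l.map (fun x => min total x)) := by
  induction l generalizing acc with
  | nil => simp [hacc]
  | cons x t ih =>
    simp only [List.foldl_cons, List.map_cons]
    by_cases hx : min total x ∈ acc
    · simp only [hx, if_pos]
      obtain ⟨h1, h2⟩ := ih acc hacc
      refine ⟨h1, fun z => ?_⟩
      rw [h2 z]
      constructor
      · rintro (h | h) <;> simp_all
      · rintro (h | h)
        · exact Or.inl h
        · rcases List.mem_cons.mp h with h | h
          · exact Or.inl (h ▸ hx)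
          · exact Or.inr (by simpa using h)
    · simp only [hx, if_false]
      have hacc' : (acc ++ [min total x]).Nodup := by
        simp [List.nodup_append, hacc]
        exact fun a ha h => hx (h ▸ ha)
      obtain ⟨h1, h2⟩ := ih (acc ++ [min total x]) hacc'
      refine ⟨h1, fun z => ?_⟩
      rw [h2 z]
      simp only [List.mem_append, List.mem_cons]
      tauto

-- insSorted keeps the list strictly increasing and adds exactly v to its elements
theorem insSorted_mem (v z : Int) (l : List Int) :
    z ∈ insSorted v l ↔ z = v ∨ z ∈ l := by
  induction l with
  | nil => simp [insSorted]
  | cons h t ih =>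
    simp only [insSorted]
    split_ifs with h1 h2
    · simp only [List.mem_cons, ih]; tauto
    · subst h2; simp
    · simp only [List.mem_cons]

theorem insSorted_pairwise (v : Int) (l : List Int) (hl : l.Pairwise (· < ·)) :
    (insSorted v l).Pairwise (· < ·) := by
  induction l with
  | nil => simp [insSorted]
  | cons h t ih =>
    simp only [insSorted]
    have ht : t.Pairwise (· < ·) := hl.tail
    have hht : ∀ b ∈ t, h < b := fun b hb => List.rel_of_pairwise_cons hl hb
    split_ifs with h1 h2
    · refine List.pairwise_cons.mpr ⟨?_, ih ht⟩
      intro b hb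
      rcases (insSorted_mem v b t).mp hb with rfl | hb
      · exact h1
      · exact hht b hb
    · exact hl
    · refine List.pairwise_cons.mpr ⟨?_, hl⟩
      intro b hb
      rcases List.mem_cons.mp hb with rfl | hb
      · omega
      · exact lt_trans (by omega) (hht b hb)

theorem fallback_caps_eq (total : Int) (seed : Int) :
    fallback_caps_py total seed = fallback_caps_py_alt total seed := by
  unfold fallback_caps_py fallback_caps_py_alt
  by_cases ht : total ≤ 0
  · simp [ht]
  · simp only [ht, if_false]
    set sd := max 1 seed with hsd
    set ramp : List Int := [sd, 300, 700, 1200, 1800, total] with hramp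
    set m := fun x : Int => min total x with hmf
    -- A side: sorted, duplicate-free, membership = clamped ramp
    obtain ⟨hAnd, hAmem⟩ := aFold_props total ramp [] List.nodup_nil
    set capsA := ramp.foldl (fun caps x =>
      let c := min total x
      if c ∈ caps then caps else caps ++ [c]) [] with hcapsA
    set SA := PySem.List.sorted capsA (fun x => x) false with hSA
    have hSAle : SA.Pairwise (· ≤ ·) := by
      have := PySem.List.sorted_pairwise (xs := capsA) (key := fun x => x)
      simpa using this
    have hSAperm : SA.Perm capsA := PySem.List.sorted_perm _ _ _
    have hSAnd : SA.Nodup := hSAperm.nodup_iff.mpr hAnd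
    have hSAmem : ∀ z, z ∈ SA ↔ z ∈ ramp.map m := by
      intro z
      rw [hSAperm.mem_iff, hAmem z]
      simp [hmf]
    -- B side: base strictly increasing, then one sorted insertion
    set base := (([300, 700, 1200, 1800] : List Int).filter (fun k => k < total)) ++ [total] with hbase
    have hbasep : base.Pairwise (· < ·) := by
      rw [hbase, List.pairwise_append]
      refine ⟨List.Pairwise.filter _ (by decide), by simp, ?_⟩
      intro a ha b hb
      simp only [List.mem_singleton] at hb
      have := List.of_mem_filter ha
      simp only [decide_eq_true_eq] at this
      omega
    set SB := insSorted (min total sd) base with hSB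
    have hSBp : SB.Pairwise (· < ·) := insSorted_pairwise _ _ hbasep
    have hSBnd : SB.Nodup := hSBp.imp (fun h => ne_of_lt h)
    have hSBle : SB.Pairwise (· ≤ ·) := hSBp.imp (fun h => le_of_lt h)
    have hSBmem : ∀ z, z ∈ SB ↔ z ∈ ramp.map m := by
      intro z
      rw [hSB, insSorted_mem]
      simp only [hbase, List.mem_append, List.mem_filter, hramp, List.map_cons, List.map_nil,
        List.mem_cons, hmf, List.not_mem_nil, decide_eq_true_eq, or_false]
      omega
    -- combine: both sorted and duplicate-free with the same elements
    have hperm : SA.Perm SB := by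
      rw [List.perm_ext_iff_of_nodup hSAnd hSBnd]
      intro z
      rw [hSAmem z, hSBmem z]
    exact hperm.eq_of_pairwise (fun a b _ _ h1 h2 => le_antisymm h1 h2) hSAle hSBle

-- ===== VERDICT (by name: the statement is the Claim_ definition above) =====
theorem fallback_caps_py_spec : Claim_equal_fallback_caps_py := by
  intro total seed _
  unfold Spec_fallback_caps_py
  exact fallback_caps_eq total seed
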